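-- pv_equiv track=rewrite | github.com/vinchinzu/euler | python/391.py | compute_winning_positions
-- ===== SOURCE A (Python) =====
-- from typing import List
--
-- def compute_winning_positions(
--     n: int,
--     is_valid_position: List[bool],
--     max_c: int,
-- ) -> List[bool]:
--     """Compute winning/losing positions for a given n.
--
--     A position c is winning if there exists a legal move m in [1, n] such that
--     the resulting position c + m is either invalid (not in S) or losing for the
--     next player. Otherwise, c is losing.
--     """
--
--     winning_positions: List[bool] = [False] * (max_c + 1)
--
--     for c in range(max_c, -1, -1):
--         if not is_valid_position[c]:
--             # Invalid positions are not reachable under correct play, treat as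
--             # losing for the player to move at c.
--             winning_positions[c] = False
--             continue
--
--         has_winning_move = False
--
--         for move in range(1, n + 1):
--             next_c = c + move
--             if next_c > max_c:
--                 # Out of our analyzed range; ignore.
--                 continue
--
--             # Only consider valid moves (next_c must be in S)
--             if is_valid_position[next_c] and not winning_positions[next_c]:
--                 has_winning_move = True
--                 break
--
--         winning_positions[c] = has_winning_move
--
--     return winning_positions
-- ===== SOURCE B (Python) =====
-- from typing import List
--
-- def compute_winning_positions(
--     n: int,
--     is_valid_position: List[bool],
--     max_c: int,
-- ) -> List[bool]:
--     """Sliding-window variant: cnt holds the number of positions j in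
--     (c, c+n] with j <= max_c that are valid and losing; c is winning iff it
--     is valid and cnt > 0."""
--     winning: List[bool] = [False] * (max_c + 1)
--     cnt = 0
--     for c in range(max_c, -1, -1):
--         w = is_valid_position[c] and cnt > 0
--         winning[c] = w
--         if n >= 1:
--             j = c + n
--             if j <= max_c and is_valid_position[j] and not winning[j]:
--                 cnt -= 1
--             if is_valid_position[c] and not w:
--                 cnt += 1
--     return winning
-- ===== Notes on version B (the rewrite author's own statement) =====
-- stated objective: faster
-- what changed: A rescans up to n moves ahead for every position; B keeps a sliding-window count of valid losing positions in (c, c+n], updated in O(1) as c decreases, so the inner scan disappears.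
import Mathlib
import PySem

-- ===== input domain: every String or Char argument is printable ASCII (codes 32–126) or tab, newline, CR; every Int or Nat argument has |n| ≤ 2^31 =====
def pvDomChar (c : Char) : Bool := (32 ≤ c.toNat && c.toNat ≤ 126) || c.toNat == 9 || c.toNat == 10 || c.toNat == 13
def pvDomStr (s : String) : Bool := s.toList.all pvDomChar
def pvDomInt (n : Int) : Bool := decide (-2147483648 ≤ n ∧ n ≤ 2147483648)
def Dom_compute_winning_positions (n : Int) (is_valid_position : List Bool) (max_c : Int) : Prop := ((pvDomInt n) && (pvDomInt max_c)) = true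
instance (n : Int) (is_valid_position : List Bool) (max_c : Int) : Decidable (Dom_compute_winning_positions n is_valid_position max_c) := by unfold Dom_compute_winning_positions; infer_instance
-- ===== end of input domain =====

-- B replaces A's inner scan over all n moves by a sliding-window count of valid losing
-- positions maintained incrementally while c decreases (objective: faster, asymptotic).


-- ===== PORT A =====
-- inner 'for move in range(1, n+1)' with break; 'continue' keeps the accumulator
def cwpInner (n max_c : Int) (valid win : List Bool) (c : Int) : Bool :=
  (PySem.List.pyRange 1 (n+1) 1).foldl
    (fun acc move =>
      if acc then acc
      else if decide (max_c < c + move) then acc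
      else PySem.List.pyGetD valid (c+move) false && !(PySem.List.pyGetD win (c+move) false))
    false

-- outer 'for c in range(max_c, -1, -1)' as countdown recursion on c
def cwpLoopA (n max_c : Int) (valid : List Bool) (c : Int) (win : List Bool) : List Bool :=
  if c < 0 then win
  else
    cwpLoopA n max_c valid (c-1)
      (if !(PySem.List.pyGetD valid c false) then win.set c.toNat false
       else win.set c.toNat (cwpInner n max_c valid win c))
termination_by (c+1).toNat
decreasing_by omega

def compute_winning_positions (n : Int) (is_valid_position : List Bool) (max_c : Int) : List Bool :=
  cwpLoopA n max_c is_valid_position max_c (List.replicate (max_c+1).toNat false)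

-- ===== PORT B =====
def cwpLoopB (n max_c : Int) (valid : List Bool) (c : Int) (win : List Bool) (cnt : Int) : List Bool :=
  if c < 0 then win
  else
    let w := PySem.List.pyGetD valid c false && decide (0 < cnt)
    let win' := win.set c.toNat w
    let cnt' :=
      if 1 ≤ n then
        let cnt₁ :=
          if decide (c+n ≤ max_c) && PySem.List.pyGetD valid (c+n) false
              && !(PySem.List.pyGetD win' (c+n) false)
          then cnt - 1 else cnt
        if PySem.List.pyGetD valid c false && !w then cnt₁ + 1 else cnt₁
      else cnt
    cwpLoopB n max_c valid (c-1) win' cnt'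
termination_by (c+1).toNat
decreasing_by omega

def compute_winning_positions_alt (n : Int) (is_valid_position : List Bool) (max_c : Int) : List Bool :=
  cwpLoopB n max_c is_valid_position max_c (List.replicate (max_c+1).toNat false) 0

-- ===== PRECONDITION & SPEC =====
-- Pre_ excludes exactly the inputs where A raises IndexError: is_valid_position[c] for
-- c in 0..max_c requires max_c < len(is_valid_position).
def Pre_compute_winning_positions (n : Int) (is_valid_position : List Bool) (max_c : Int) : Prop :=
  max_c < (is_valid_position.length : Int)
instance (n : Int) (is_valid_position : List Bool) (max_c : Int) : Decidable (Pre_compute_winning_positions n is_valid_position max_c) := by unfold Pre_compute_winning_positions; infer_instance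

def pvWitness_compute_winning_positions : Int × List Bool × Int := (2, [true, false, true, true], 3)

def Spec_compute_winning_positions (n : Int) (is_valid_position : List Bool) (max_c : Int) (out : List Bool) : Prop := out = compute_winning_positions_alt n is_valid_position max_c
instance (n : Int) (is_valid_position : List Bool) (max_c : Int) (out : List Bool) : Decidable (Spec_compute_winning_positions n is_valid_position max_c out) := by unfold Spec_compute_winning_positions; infer_instance

-- ===== CLAIM (what is proved, stated in full; the proofs are below) =====
def Claim_equal_compute_winning_positions : Prop := ∀ (n : Int) (is_valid_position : List Bool) (max_c : Int), Dom_compute_winning_positions n is_valid_position max_c → Pre_compute_winning_positions n is_valid_position max_c → Spec_compute_winning_positions n is_valid_position max_c (compute_winning_positions n is_valid_position max_c)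

-- ===== LEMMAS AND PROOFS =====

-- the sliding-window invariant: what B's cnt counts at position c
def cwpCnt (n max_c : Int) (valid win : List Bool) (c : Int) : Int :=
  ((PySem.List.pyRange (c+1) (c+n+1) 1).filter
    (fun j => decide (j ≤ max_c) && (PySem.List.pyGetD valid j false
                && !(PySem.List.pyGetD win j false)))).length

lemma pv_filter_pos (l : List Int) (h : Int → Bool) :
    0 < (l.filter h).length ↔ ∃ x ∈ l, h x := by
  rw [List.length_pos_iff]
  constructor
  · intro hne
    rcases List.exists_mem_of_ne_nil _ hne with ⟨x, hx⟩
    exact ⟨x, (List.mem_filter.mp hx).1, (List.mem_filter.mp hx).2⟩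
  · rintro ⟨x, hx, hpx⟩ hnil
    exact (List.filter_eq_nil_iff.mp hnil) x hx hpx

-- A's break-fold is an 'any'
lemma pv_foldl_break (p q : Int → Bool) :
    ∀ (l : List Int) (b : Bool),
      l.foldl (fun acc x => if acc then acc else if q x then acc else p x) b
        = (b || l.any (fun x => !q x && p x)) := by
  intro l
  induction l with
  | nil => intro b; simp
  | cons x xs ih =>
    intro b
    simp only [List.foldl_cons, List.any_cons, ih]
    cases b <;> cases hq : q x <;> cases hp : p x <;> simp

lemma pv_pyGetD_set_ne (xs : List Bool) (m : Nat) (v : Bool) (j : Int)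
    (hj : 0 ≤ j) (hne : j ≠ (m : Int)) :
    PySem.List.pyGetD (xs.set m v) j false = PySem.List.pyGetD xs j false := by
  rw [PySem.List.pyGetD_of_nonneg (h := hj), PySem.List.pyGetD_of_nonneg (h := hj),
      List.getD_eq_getElem?_getD, List.getD_eq_getElem?_getD, List.getElem?_set_ne (by omega)]

lemma pv_pyGetD_set_self (xs : List Bool) (m : Nat) (v : Bool) (hm : m < xs.length) :
    PySem.List.pyGetD (xs.set m v) (m : Int) false = v := by
  rw [PySem.List.pyGetD_of_nonneg (h := by positivity)]
  simp [hm]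

-- the winning decision of A equals B's 'valid[c] and cnt > 0'
lemma pv_inner_eq_cnt (n max_c : Int) (valid win : List Bool) (c : Int) :
    cwpInner n max_c valid win c = decide (0 < cwpCnt n max_c valid win c) := by
  unfold cwpInner cwpCnt
  rw [pv_foldl_break, Bool.false_or]
  rcases Bool.eq_false_or_eq_true ((PySem.List.pyRange 1 (n+1) 1).any
      (fun x => !decide (max_c < c + x) && (PySem.List.pyGetD valid (c+x) false
          && !(PySem.List.pyGetD win (c+x) false)))) with hany | hany
  · rw [hany]
    have hpos : 0 < ((PySem.List.pyRange (c+1) (c+n+1) 1).filter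
        (fun j => decide (j ≤ max_c) && (PySem.List.pyGetD valid j false
            && !(PySem.List.pyGetD win j false)))).length := by
      rw [pv_filter_pos]
      rcases List.any_eq_true.mp hany with ⟨x, hx, hpx⟩
      have hmem := PySem.List.mem_pyRange_one.mp hx
      refine ⟨c + x, PySem.List.mem_pyRange_one.mpr (by omega), ?_⟩
      simp only [Bool.and_eq_true, Bool.not_eq_eq_eq_not, Bool.not_true,
        decide_eq_true_eq, decide_eq_false_iff_not, not_lt] at hpx ⊢
      tauto
    have hpos' : 0 < (((PySem.List.pyRange (c+1) (c+n+1) 1).filter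
        (fun j => decide (j ≤ max_c) && (PySem.List.pyGetD valid j false
            && !(PySem.List.pyGetD win j false)))).length : Int) := by
      exact_mod_cast hpos
    exact (decide_eq_true hpos').symm

  · rw [hany]
    have hpos : ¬ (0 < ((PySem.List.pyRange (c+1) (c+n+1) 1).filter
        (fun j => decide (j ≤ max_c) && (PySem.List.pyGetD valid j false
            && !(PySem.List.pyGetD win j false)))).length) := by
      rw [pv_filter_pos]
      rintro ⟨j, hj, hpj⟩
      have hmem := PySem.List.mem_pyRange_one.mp hj
      have hm : (j - c) ∈ PySem.List.pyRange 1 (n+1) 1 :=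
        PySem.List.mem_pyRange_one.mpr (by omega)
      have := List.any_eq_false.mp hany (j - c) hm
      rw [show c + (j - c) = j from by ring] at this
      simp only [Bool.and_eq_true, Bool.not_eq_eq_eq_not, Bool.not_true,
        decide_eq_true_eq, decide_eq_false_iff_not, not_lt] at this hpj
      tauto
    have hpos' : ¬ (0 < (((PySem.List.pyRange (c+1) (c+n+1) 1).filter
        (fun j => decide (j ≤ max_c) && (PySem.List.pyGetD valid j false
            && !(PySem.List.pyGetD win j false)))).length : Int)) := by
      exact_mod_cast hpos
    exact (decide_eq_false hpos').symm
-- window update: what cnt must become for position c-1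
lemma pv_cnt_step (n max_c : Int) (valid win : List Bool) (c : Int) (w : Bool)
    (hc0 : 0 ≤ c) (hcm : c ≤ max_c) (hlen : win.length = (max_c+1).toNat) (hn : 1 ≤ n) :
    cwpCnt n max_c valid (win.set c.toNat w) (c-1)
      = cwpCnt n max_c valid win c
        - (if decide (c+n ≤ max_c) && PySem.List.pyGetD valid (c+n) false
              && !(PySem.List.pyGetD (win.set c.toNat w) (c+n) false) then 1 else 0)
        + (if PySem.List.pyGetD valid c false && !w then 1 else 0) := by
  have hset_ne : ∀ j : Int, c < j →
      PySem.List.pyGetD (win.set c.toNat w) j false = PySem.List.pyGetD win j false := by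
    intro j hj
    exact pv_pyGetD_set_ne win c.toNat w j (by omega) (by omega)
  unfold cwpCnt
  have hsplit : PySem.List.pyRange (c+1) (c+n+1) 1
      = PySem.List.pyRange (c+1) (c+n) 1 ++ [c+n] := by
    rw [show c+n+1 = (c+n)+1 from by ring, PySem.List.pyRange_one_succ_right (by omega)]
  have hcons : PySem.List.pyRange (c-1+1) (c-1+n+1) 1
      = c :: PySem.List.pyRange (c+1) (c+n) 1 := by
    rw [show c-1+1 = c from by ring, show c-1+n+1 = c+n from by ring,
        PySem.List.pyRange_one_cons (by omega)]
  rw [hsplit, hcons, List.filter_append, List.filter_cons, List.length_append]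
  have hmid : (PySem.List.pyRange (c+1) (c+n) 1).filter
        (fun j => decide (j ≤ max_c) && (PySem.List.pyGetD valid j false
            && !(PySem.List.pyGetD (win.set c.toNat w) j false)))
      = (PySem.List.pyRange (c+1) (c+n) 1).filter
        (fun j => decide (j ≤ max_c) && (PySem.List.pyGetD valid j false
            && !(PySem.List.pyGetD win j false))) := by
    apply List.filter_congr
    intro j hj
    have : c + 1 ≤ j := (PySem.List.mem_pyRange_one.mp hj).1
    rw [hset_ne j (by omega)]
  rw [hmid]
  have hgetc : PySem.List.pyGetD (win.set c.toNat w) c false = w := by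
    have : c.toNat < win.length := by omega
    have h2 := pv_pyGetD_set_self win c.toNat w this
    rwa [show ((c.toNat : Int)) = c from by omega] at h2
  have hgetn : PySem.List.pyGetD (win.set c.toNat w) (c+n) false
      = if decide (c+n ≤ max_c) then PySem.List.pyGetD (win.set c.toNat w) (c+n) false
        else PySem.List.pyGetD (win.set c.toNat w) (c+n) false := by simp
  -- head of the new window
  have hcmax : decide (c ≤ max_c) = true := by simpa using hcm
  rw [List.filter_singleton]
  by_cases hv : PySem.List.pyGetD valid c false
  · by_cases hwend : (decide (c+n ≤ max_c) && (PySem.List.pyGetD valid (c+n) false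
        && !(PySem.List.pyGetD win (c+n) false))) = true
    · have hend' : PySem.List.pyGetD (win.set c.toNat w) (c+n) false
          = PySem.List.pyGetD win (c+n) false := hset_ne (c+n) (by omega)
      cases w <;> simp [hv, hcmax, hgetc, hwend, hend', Bool.and_assoc] at *
    · have hend' : PySem.List.pyGetD (win.set c.toNat w) (c+n) false
          = PySem.List.pyGetD win (c+n) false := hset_ne (c+n) (by omega)
      cases w <;>
        simp only [hv, hcmax, hgetc, hend', Bool.and_assoc] at * <;>
        simp only [hwend] <;> simp
  · have hv' : PySem.List.pyGetD valid c false = false := by simpa using hv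
    have hend' : PySem.List.pyGetD (win.set c.toNat w) (c+n) false
        = PySem.List.pyGetD win (c+n) false := hset_ne (c+n) (by omega)
    by_cases hwend : (decide (c+n ≤ max_c) && (PySem.List.pyGetD valid (c+n) false
        && !(PySem.List.pyGetD win (c+n) false))) = true <;>
      simp only [hv', hgetc, hend', Bool.and_assoc] at * <;>
      simp [hwend]

-- empty window when n ≤ 0
lemma pv_cnt_nonpos (n max_c : Int) (valid win : List Bool) (c : Int) (hn : ¬ 1 ≤ n) :
    cwpCnt n max_c valid win c = 0 := by
  unfold cwpCnt
  rw [PySem.List.pyRange_one_eq_nil (by omega)]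
  simp

-- window above max_c is empty
lemma pv_cnt_top (n max_c : Int) (valid win : List Bool) (c : Int) (hc : max_c ≤ c) :
    cwpCnt n max_c valid win c = 0 := by
  unfold cwpCnt
  have : (PySem.List.pyRange (c+1) (c+n+1) 1).filter
      (fun j => decide (j ≤ max_c) && (PySem.List.pyGetD valid j false
          && !(PySem.List.pyGetD win j false))) = [] := by
    rw [List.filter_eq_nil_iff]
    intro j hj
    have := (PySem.List.mem_pyRange_one.mp hj).1
    simp only [Bool.and_eq_true, decide_eq_true_eq]
    intro ⟨h1, _⟩
    omega
  rw [this]; simp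

-- main loop equivalence under the window invariant
lemma pv_loop_eq (n max_c : Int) (valid : List Bool) :
    ∀ (k : Nat) (c : Int), c < (k : Int) → c ≤ max_c →
    ∀ (win : List Bool), win.length = (max_c+1).toNat →
    ∀ (cnt : Int), cnt = cwpCnt n max_c valid win c →
      cwpLoopA n max_c valid c win = cwpLoopB n max_c valid c win cnt := by
  intro k
  induction k with
  | zero =>
    intro c hck _ win _ cnt _
    have hc : c < 0 := by exact_mod_cast hck
    rw [cwpLoopA, cwpLoopB, if_pos hc, if_pos hc]
  | succ m ih =>
    intro c hck hcm win hlen cnt hcnt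
    by_cases hc : c < 0
    · rw [cwpLoopA, cwpLoopB, if_pos hc, if_pos hc]
    · rw [cwpLoopA, cwpLoopB, if_neg hc, if_neg hc]
      simp only []
      have hc0 : 0 ≤ c := by omega
      -- the written value is the same
      have hw : (if !(PySem.List.pyGetD valid c false) then win.set c.toNat false
            else win.set c.toNat (cwpInner n max_c valid win c))
          = win.set c.toNat (PySem.List.pyGetD valid c false && decide (0 < cnt)) := by
        by_cases hv : PySem.List.pyGetD valid c false
        · rw [if_neg (by simp [hv]), pv_inner_eq_cnt, hcnt, hv, Bool.true_and]
        · have hv' : PySem.List.pyGetD valid c false = false := by simpa using hv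
          rw [if_pos (by simp [hv']), hv', Bool.false_and]
      rw [hw]
      set w := PySem.List.pyGetD valid c false && decide (0 < cnt) with hwdef
      -- apply IH at c-1 with the updated count
      by_cases hn : 1 ≤ n
      · rw [if_pos hn]
        apply ih (c-1) (by omega) (by omega) _ (by simpa using hlen)
        rw [pv_cnt_step n max_c valid win c w hc0 hcm hlen hn, ← hcnt]
        by_cases h1 : (decide (c+n ≤ max_c) && PySem.List.pyGetD valid (c+n) false
              && !(PySem.List.pyGetD (win.set c.toNat w) (c+n) false)) = true <;>
          by_cases h2 : (PySem.List.pyGetD valid c false && !w) = true <;>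
          simp only [Bool.and_assoc] at h1 h2 ⊢ <;> simp [h1, h2]
      · rw [if_neg hn]
        apply ih (c-1) (by omega) (by omega) _ (by simpa using hlen)
        rw [pv_cnt_nonpos n max_c valid _ _ hn, hcnt, pv_cnt_nonpos n max_c valid _ _ hn]

-- ===== VERDICT (by name: the statement is the Claim_ definition above) =====
theorem compute_winning_positions_spec : Claim_equal_compute_winning_positions := by
  intro n valid max_c _ hpre
  unfold Spec_compute_winning_positions compute_winning_positions compute_winning_positions_alt
  by_cases hm : max_c < 0
  · rw [cwpLoopA, cwpLoopB, if_pos hm, if_pos hm]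
  · exact pv_loop_eq n max_c valid (max_c+1).toNat max_c (by omega) le_rfl
      (List.replicate (max_c+1).toNat false) (by simp)
      0 (by rw [pv_cnt_top n max_c valid _ max_c le_rfl])
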